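-- pv_equiv track=rewrite | github.com/VilaNova0/MC521 | codes/march 5/d.py | procura_25_75
-- ===== SOURCE A (Python) =====
-- def procura_25_75(n):
--     p = -1
--     for i in range(len(n) - 1, -1, -1):
--         if n[i] == '5':
--             p = i
--             break
--     for i in range(p - 1, -1, -1):
--         if n[i] in ['2', '7']:
--             return p, i
--     return -1, -1
-- ===== SOURCE B (Python) =====
-- def procura_25_75(n):
--     last27 = -1
--     ans = (-1, -1)
--     for i, c in enumerate(n):
--         if c == '5':
--             ans = (i, last27) if last27 != -1 else (-1, -1)
--         elif c in ('2', '7'):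
--             last27 = i
--     return ans
-- ===== Notes on version B (the rewrite author's own statement) =====
-- stated objective: simpler
-- what changed: Replaced A's two backward scans (rfind of '5', then backward search for a preceding '2'/'7') with a single forward pass that tracks the index of the most recent '2'/'7' and updates the answer at each '5'.
import Mathlib
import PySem

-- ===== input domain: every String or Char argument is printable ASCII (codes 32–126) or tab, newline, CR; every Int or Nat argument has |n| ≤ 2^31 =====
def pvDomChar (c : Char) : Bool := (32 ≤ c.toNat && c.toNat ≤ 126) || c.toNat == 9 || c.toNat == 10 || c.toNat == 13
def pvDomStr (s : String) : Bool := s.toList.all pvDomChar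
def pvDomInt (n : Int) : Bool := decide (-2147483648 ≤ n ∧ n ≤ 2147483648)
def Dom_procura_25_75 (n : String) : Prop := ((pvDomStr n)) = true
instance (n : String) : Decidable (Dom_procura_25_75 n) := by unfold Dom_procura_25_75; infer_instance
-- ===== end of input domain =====

-- B replaces A's two backward scans by one forward pass tracking the most recent '2'/'7' index (objective: simpler, one pass).

-- ===== PORT A =====
-- first backward loop of A: range(len-1, -1, -1), break on '5'; argument j is i+1
def pvLoop1A (cs : List Char) : Nat → Int
  | 0 => -1
  | j+1 => if cs.getD j ' ' = '5' then (j : Int) else pvLoop1A cs j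

-- second backward loop of A: range(p-1, -1, -1), return on '2'/'7'; argument j is i+1
def pvLoop2A (cs : List Char) (p : Int) : Nat → Int × Int
  | 0 => (-1, -1)
  | j+1 => if cs.getD j ' ' = '2' ∨ cs.getD j ' ' = '7' then (p, (j : Int)) else pvLoop2A cs p j

def procura_25_75 (n : String) : Int × Int :=
  let cs := n.toList
  let p := pvLoop1A cs cs.length
  pvLoop2A cs p p.toNat

-- ===== PORT B =====
-- one forward step of B's loop: state = (last27, ans)
def pvStepB (st : Int × (Int × Int)) (ic : Int × Char) : Int × (Int × Int) :=
  if ic.2 = '5' then (st.1, if st.1 ≠ -1 then (ic.1, st.1) else (-1, -1))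
  else if ic.2 = '2' ∨ ic.2 = '7' then (ic.1, st.2)
  else st

def procura_25_75_alt (n : String) : Int × Int :=
  ((PySem.List.enumerate n.toList 0).foldl pvStepB (-1, (-1, -1))).2

-- ===== PRECONDITION & SPEC =====
def Spec_procura_25_75 (n : String) (out : Int × Int) : Prop := out = procura_25_75_alt n
instance (n : String) (out : Int × Int) : Decidable (Spec_procura_25_75 n out) := by unfold Spec_procura_25_75; infer_instance

-- ===== CLAIM (what is proved, stated in full; the proofs are below) =====
def Claim_equal_procura_25_75 : Prop := ∀ (n : String), Dom_procura_25_75 n → Spec_procura_25_75 n (procura_25_75 n)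

-- ===== LEMMAS AND PROOFS =====

-- index of the last '2'/'7' among the first j characters (backward-scan form), -1 if none
def pvLoop27 (cs : List Char) : Nat → Int
  | 0 => -1
  | j+1 => if cs.getD j ' ' = '2' ∨ cs.getD j ' ' = '7' then (j : Int) else pvLoop27 cs j

theorem pvLoop2A_eq (cs : List Char) (p : Int) (k : Nat) :
    pvLoop2A cs p k = if pvLoop27 cs k = -1 then (-1, -1) else (p, pvLoop27 cs k) := by
  induction k with
  | zero => simp [pvLoop2A, pvLoop27]
  | succ j ih =>
    simp only [pvLoop2A, pvLoop27]
    split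
    · have : ((j : Int)) ≠ -1 := by omega
      simp [this]
    · exact ih

theorem getD_append_left (cs : List Char) (c d : Char) (j : Nat) (h : j < cs.length) :
    (cs ++ [c]).getD j d = cs.getD j d := by
  simp [List.getD, List.getElem?_append_left h]

theorem pvLoop1A_append (cs : List Char) (c : Char) (j : Nat) (h : j ≤ cs.length) :
    pvLoop1A (cs ++ [c]) j = pvLoop1A cs j := by
  induction j with
  | zero => rfl
  | succ i ih =>
    simp only [pvLoop1A, getD_append_left cs c ' ' i (by omega)]
    rw [ih (by omega)]

theorem pvLoop27_append (cs : List Char) (c : Char) (j : Nat) (h : j ≤ cs.length) :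
    pvLoop27 (cs ++ [c]) j = pvLoop27 cs j := by
  induction j with
  | zero => rfl
  | succ i ih =>
    simp only [pvLoop27, getD_append_left cs c ' ' i (by omega)]
    rw [ih (by omega)]

theorem pvLoop1A_le (cs : List Char) (k : Nat) : pvLoop1A cs k ≤ (k : Int) := by
  induction k with
  | zero => simp [pvLoop1A]
  | succ j ih =>
    simp only [pvLoop1A]
    split
    · push_cast; omega
    · push_cast at ih ⊢; omega

theorem getD_append_last (cs : List Char) (c d : Char) :
    (cs ++ [c]).getD cs.length d = c := by
  simp [List.getD]

-- main invariant: B's fold state on cs = (last 2/7 index of cs, A's answer on cs)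
theorem pvInv (cs : List Char) :
    (PySem.List.enumerate cs 0).foldl pvStepB (-1, (-1, -1))
      = (pvLoop27 cs cs.length,
         pvLoop2A cs (pvLoop1A cs cs.length) (pvLoop1A cs cs.length).toNat) := by
  induction cs using List.reverseRecOn with
  | nil => simp [PySem.List.enumerate, pvLoop27, pvLoop1A, pvLoop2A]
  | append_singleton cs c ih =>
    rw [PySem.List.enumerate_append, List.foldl_append, ih]
    have hlen : (cs ++ [c]).length = cs.length + 1 := by simp
    have h27tail : pvLoop27 (cs ++ [c]) cs.length = pvLoop27 cs cs.length :=
      pvLoop27_append cs c cs.length le_rfl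
    by_cases h5 : c = '5'
    · -- a '5' at the end: p becomes cs.length, scan the first cs.length chars
      have hp : pvLoop1A (cs ++ [c]) (cs ++ [c]).length = (cs.length : Int) := by
        rw [hlen]; simp only [pvLoop1A, getD_append_last]; rw [if_pos h5]
      have h27full : pvLoop27 (cs ++ [c]) (cs ++ [c]).length = pvLoop27 cs cs.length := by
        rw [hlen]; simp only [pvLoop27, getD_append_last]
        rw [if_neg (by simp [h5]), h27tail]
      have htn : ((cs.length : Int)).toNat = cs.length := by omega
      have hR : pvLoop2A (cs ++ [c]) ((cs.length : Int)) ((cs.length : Int)).toNat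
          = if pvLoop27 cs cs.length = -1 then (-1, -1)
            else ((cs.length : Int), pvLoop27 cs cs.length) := by
        rw [pvLoop2A_eq, htn, h27tail]
      rw [hp, h27full, hR]
      by_cases hz : pvLoop27 cs cs.length = -1 <;>
        simp [PySem.List.enumerate, pvStepB, h5, hz]
    · have hle : (pvLoop1A cs cs.length).toNat ≤ cs.length := by
        have := pvLoop1A_le cs cs.length; omega
      have hp : pvLoop1A (cs ++ [c]) (cs ++ [c]).length = pvLoop1A cs cs.length := by
        rw [hlen]; simp only [pvLoop1A, getD_append_last]
        rw [if_neg h5, pvLoop1A_append cs c cs.length le_rfl]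
      have hR : pvLoop2A (cs ++ [c]) (pvLoop1A cs cs.length) (pvLoop1A cs cs.length).toNat
          = pvLoop2A cs (pvLoop1A cs cs.length) (pvLoop1A cs cs.length).toNat := by
        rw [pvLoop2A_eq (cs ++ [c]), pvLoop27_append cs c _ hle, ← pvLoop2A_eq]
      by_cases h27c : c = '2' ∨ c = '7'
      · -- a '2'/'7' at the end: last27 becomes cs.length, answer unchanged
        have h27full : pvLoop27 (cs ++ [c]) (cs ++ [c]).length = (cs.length : Int) := by
          rw [hlen]; simp only [pvLoop27, getD_append_last]; rw [if_pos h27c]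
        rw [hp, h27full, hR]
        simp [PySem.List.enumerate, pvStepB, h5, h27c]
      · -- any other char: state unchanged
        have h27full : pvLoop27 (cs ++ [c]) (cs ++ [c]).length = pvLoop27 cs cs.length := by
          rw [hlen]; simp only [pvLoop27, getD_append_last]; rw [if_neg h27c, h27tail]
        rw [hp, h27full, hR]
        simp [PySem.List.enumerate, pvStepB, h5, h27c]

-- ===== VERDICT (by name: the statement is the Claim_ definition above) =====
theorem procura_25_75_spec : Claim_equal_procura_25_75 := by
  intro n _
  unfold Spec_procura_25_75 procura_25_75 procura_25_75_alt
  rw [pvInv]
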